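-- pv_equiv track=rewrite | github.com/pqpeqr/RL-2048-with-Reinforce-and-Actor-Critic | game/game.py | _row_move_left_preview
-- ===== SOURCE A (Python) =====
-- def _row_move_left_preview(row: list[int]) -> list[int]:
--     cells = [x for x in row if x != 0]
--     new_row: list[int] = []
--     i = 0
--     while i < len(cells):
--         if i + 1 < len(cells) and cells[i] == cells[i + 1]:
--             val = cells[i] << 1
--             new_row.append(val)
--             i += 2
--         else:
--             new_row.append(cells[i])
--             i += 1
--     return new_row + [0] * (len(row) - len(new_row))
-- ===== SOURCE B (Python) =====
-- def _row_move_left_preview(row: list[int]) -> list[int]: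
--     out: list[int] = []
--     merged = False
--     for x in row:
--         if x == 0:
--             continue
--         if out and not merged and out[-1] == x:
--             out[-1] = x * 2
--             merged = True
--         else:
--             out.append(x)
--             merged = False
--     return out + [0] * (len(row) - len(out))
-- ===== Notes on version B (the rewrite author's own statement) =====
-- stated objective: alternative
-- what changed: Replaced A's filter-then-index-scan with one-cell look-ahead and skip-by-2 by a single direct pass over the row that skips zeros and merges backwards into the output tail guarded by a 'merged' flag.
import Mathlib
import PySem

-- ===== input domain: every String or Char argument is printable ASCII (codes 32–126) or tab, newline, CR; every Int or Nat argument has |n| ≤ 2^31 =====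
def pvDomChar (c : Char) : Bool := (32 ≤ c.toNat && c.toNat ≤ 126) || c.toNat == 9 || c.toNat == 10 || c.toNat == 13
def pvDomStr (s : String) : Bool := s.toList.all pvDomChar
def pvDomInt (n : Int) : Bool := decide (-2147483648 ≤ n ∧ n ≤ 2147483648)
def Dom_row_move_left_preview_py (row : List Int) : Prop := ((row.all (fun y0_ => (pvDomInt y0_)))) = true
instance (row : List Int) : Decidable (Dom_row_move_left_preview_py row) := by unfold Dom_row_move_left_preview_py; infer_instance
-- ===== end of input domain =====

-- B re-implements the merge as a single look-back pass with a 'merged' flag instead of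
-- A's filter-then-look-ahead index scan; same cost, different decomposition (return value only).

-- ===== PORT A =====
-- A's while loop over the filtered cells: look ahead one cell, merge and skip 2, else skip 1.
def rmlGoA : List Int → List Int
  | [] => []
  | [x] => [x]
  | x :: y :: rest => if x = y then (2 * x) :: rmlGoA rest else x :: rmlGoA (y :: rest)   -- x << 1 = 2*x exactly in Python

def row_move_left_preview_py (row : List Int) : List Int :=
  let cells := row.filter (fun x => x != 0)
  let new_row := rmlGoA cells
  new_row ++ List.replicate (row.length - new_row.length) 0

-- ===== PORT B =====
-- B's loop body; the output list is kept reversed (head = Python out[-1]).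
def rmlStepB (s : List Int × Bool) (x : Int) : List Int × Bool :=
  if x = 0 then s
  else
    match s.1, s.2 with
    | h :: t, false => if h = x then (x * 2 :: t, true) else (x :: s.1, false)
    | _, _ => (x :: s.1, false)

def row_move_left_preview_py_alt (row : List Int) : List Int :=
  let s := row.foldl rmlStepB ([], false)
  s.1.reverse ++ List.replicate (row.length - s.1.length) 0

-- ===== PRECONDITION & SPEC =====
def Spec_row_move_left_preview_py (row : List Int) (out : List Int) : Prop := out = row_move_left_preview_py_alt row
instance (row : List Int) (out : List Int) : Decidable (Spec_row_move_left_preview_py row out) := by unfold Spec_row_move_left_preview_py; infer_instance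

-- ===== CLAIM (what is proved, stated in full; the proofs are below) =====
def Claim_equal_row_move_left_preview_py : Prop := ∀ (row : List Int), Dom_row_move_left_preview_py row → Spec_row_move_left_preview_py row (row_move_left_preview_py row)

-- ===== LEMMAS AND PROOFS =====

-- folding B's step over a list equals folding it over the list with zeros removed
theorem rml_foldl_filter (row : List Int) (s : List Int × Bool) :
    List.foldl rmlStepB s row = List.foldl rmlStepB s (row.filter (fun x => x != 0)) := by
  induction row generalizing s with
  | nil => rfl
  | cons a t ih =>
    by_cases ha : a = 0
    · simp [ha, rmlStepB, List.filter, ih]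
    · simp only [List.filter, List.foldl]
      have : (a != 0) = true := by simpa using ha
      rw [this]
      simp [List.foldl, ih]

-- after appending x, a non-matching (and nonzero) next cell makes the flag irrelevant
theorem rml_false_eq_true (h : Int) (t : List Int) (x : Int) (acc : List Int)
    (hx : x ≠ h) (h0 : h ≠ 0) :
    List.foldl rmlStepB (x :: acc, false) (h :: t) = List.foldl rmlStepB (x :: acc, true) (h :: t) := by
  simp [List.foldl, rmlStepB, h0, hx]

theorem rml_main (cells : List Int) (acc : List Int)
    (hnz : ∀ a ∈ cells, a ≠ 0) :
    (List.foldl rmlStepB (acc, true) cells).1 = (rmlGoA cells).reverse ++ acc := by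
  induction cells using rmlGoA.induct generalizing acc with
  | case1 => simp [rmlGoA]
  | case2 x =>
    have hx : x ≠ 0 := hnz x (by simp)
    simp [List.foldl, rmlStepB, hx, rmlGoA]
  | case3 y rest ih =>
    have hy : y ≠ 0 := hnz y (by simp)
    have step : List.foldl rmlStepB (acc, true) (y :: y :: rest) =
        List.foldl rmlStepB (y * 2 :: acc, true) rest := by
      simp [List.foldl, rmlStepB, hy]
    rw [step, ih (acc := y * 2 :: acc) (fun a ha => hnz a (by simp [ha]))]
    simp [rmlGoA, mul_comm]
  | case4 x y rest hxy ih =>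
    have hx : x ≠ 0 := hnz x (by simp)
    have hy : y ≠ 0 := hnz y (by simp)
    have step : List.foldl rmlStepB (acc, true) (x :: y :: rest) =
        List.foldl rmlStepB (x :: acc, false) (y :: rest) := by
      simp [List.foldl, rmlStepB, hx]
    rw [step, rml_false_eq_true y rest x acc (fun e => hxy e) hy,
        ih (acc := x :: acc) (fun a ha => hnz a (by simp [ha]))]
    simp [rmlGoA, if_neg hxy]

theorem rml_init (cells : List Int) (hnz : ∀ a ∈ cells, a ≠ 0) :
    (List.foldl rmlStepB (([] : List Int), false) cells).1 = (rmlGoA cells).reverse := by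
  cases cells with
  | nil => simp [rmlGoA]
  | cons h t =>
    have hh : h ≠ 0 := hnz h (by simp)
    have e : List.foldl rmlStepB (([] : List Int), false) (h :: t) =
        List.foldl rmlStepB (([] : List Int), true) (h :: t) := by
      simp [List.foldl, rmlStepB, hh]
    rw [e]
    simpa using rml_main (h :: t) [] hnz

-- ===== VERDICT (by name: the statement is the Claim_ definition above) =====
theorem row_move_left_preview_py_spec : Claim_equal_row_move_left_preview_py := by
  intro row _
  unfold Spec_row_move_left_preview_py row_move_left_preview_py row_move_left_preview_py_alt
  have hnz : ∀ a ∈ row.filter (fun x => x != 0), a ≠ 0 := by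
    intro a ha
    simpa using (List.mem_filter.mp ha).2
  have h1 := rml_foldl_filter row (([] : List Int), false)
  have h2 := rml_init (row.filter (fun x => x != 0)) hnz
  show rmlGoA (List.filter (fun x => x != 0) row) ++
      List.replicate (row.length - (rmlGoA (List.filter (fun x => x != 0) row)).length) 0 =
    (List.foldl rmlStepB (([] : List Int), false) row).1.reverse ++
      List.replicate (row.length - (List.foldl rmlStepB (([] : List Int), false) row).1.length) 0
  rw [h1, h2]
  simp
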